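-- pv_equiv track=rewrite | github.com/ApriF/Compilation-Group2 | pointeurs/compil2.py | initialisation_variable
-- ===== SOURCE A (Python) =====
-- def initialisation_variable(var, type_var, compteur, niveau=0):
--     #ici, on initialise une variable en particulier
--     code = ""
--
--     if type_var == "int":
--         code += f"""mov rbx, [argv]
-- mov rdi, [rbx+{compteur * 8}]
-- call atoi
-- mov [{var}], rdi
-- """
--
--     elif "*" in type_var:
--         code += f"""mov rdi, 8
-- call malloc
-- mov {var}, rdi
-- """
--         pointeur_temp = f"p{niveau}"
--         code += f"mov {pointeur_temp}, rdi\n"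
--         next_var = f"[{pointeur_temp}]"
--         next_type = type_var[:-1].strip()
--         code += initialisation_variable(next_var, next_type, compteur, niveau + 1)
--
--     return code
-- ===== SOURCE B (Python) =====
-- def initialisation_variable(var, type_var, compteur, niveau=0):
--     # iterative version: peel pointer levels in a while loop, then emit the int init
--     code = ""
--     while "*" in type_var:
--         code += f"""mov rdi, 8
-- call malloc
-- mov {var}, rdi
-- mov p{niveau}, rdi
-- """
--         var = f"[p{niveau}]"
--         type_var = type_var[:-1].strip()
--         niveau += 1
--     if type_var == "int":
--         code += f"""mov rbx, [argv]
-- mov rdi, [rbx+{compteur * 8}]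
-- call atoi
-- mov [{var}], rdi
-- """
--     return code
-- ===== Notes on version B (the rewrite author's own statement) =====
-- stated objective: simpler
-- what changed: Replaced A's tail recursion over pointer levels by an explicit while-loop that accumulates the code string and rebinds var/type_var/niveau in place, emitting the int-init block after the loop.
import Mathlib
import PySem

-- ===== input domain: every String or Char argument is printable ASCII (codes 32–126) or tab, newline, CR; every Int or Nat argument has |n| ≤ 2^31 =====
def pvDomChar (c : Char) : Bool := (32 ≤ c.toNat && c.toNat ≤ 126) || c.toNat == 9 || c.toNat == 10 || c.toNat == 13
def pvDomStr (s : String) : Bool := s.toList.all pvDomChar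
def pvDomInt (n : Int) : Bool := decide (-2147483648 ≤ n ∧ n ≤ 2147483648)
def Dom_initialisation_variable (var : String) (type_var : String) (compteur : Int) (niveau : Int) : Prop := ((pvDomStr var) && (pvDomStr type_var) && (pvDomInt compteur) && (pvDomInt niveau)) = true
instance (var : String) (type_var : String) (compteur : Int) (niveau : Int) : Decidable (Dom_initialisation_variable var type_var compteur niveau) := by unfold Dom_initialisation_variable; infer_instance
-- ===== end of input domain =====

-- B replaces A's tail recursion over pointer levels by an explicit while-loop with a
-- string accumulator (objective: simpler/iterative decomposition, same cost).

-- termination measure fact, cited by both ports' decreasing_by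
theorem pvStripDropLastLt (t : List Char) (h : PySem.Chars.isIn ['*'] t = true) :
    (PySem.Chars.strip (PySem.List.slice t none (some (-1)))).length < t.length := by
  have hne : t ≠ [] := by rintro rfl; exact absurd h (by decide)
  rw [PySem.List.slice_to_neg_one]
  have h1 : (PySem.Chars.strip t.dropLast).length ≤ t.dropLast.length := by
    unfold PySem.Chars.strip PySem.Chars.rstrip PySem.Chars.lstrip
    have a1 := (List.dropWhile_sublist (p := PySem.Chars.isspace)
      (l := (List.dropWhile PySem.Chars.isspace t.dropLast).reverse)).length_le
    have a2 := (List.dropWhile_sublist (p := PySem.Chars.isspace) (l := t.dropLast)).length_le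
    simp only [List.length_reverse] at *
    omega
  have h2 : t.dropLast.length = t.length - 1 := List.length_dropLast
  have h3 : 0 < t.length := List.length_pos_iff.mpr hne
  omega

-- ===== PORT A =====  (A's recursion, on the character list of type_var)
def initialisation_variable_rec (var : String) (t : List Char) (compteur : Int) (niveau : Int) : String :=
  if t = ['i','n','t'] then
    "mov rbx, [argv]\nmov rdi, [rbx+" ++ PySem.Int.toStr (compteur * 8) ++ "]\ncall atoi\nmov [" ++ var ++ "], rdi\n"
  else if h : PySem.Chars.isIn ['*'] t = true then
    let pointeur_temp := "p" ++ PySem.Int.toStr niveau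
    ("mov rdi, 8\ncall malloc\nmov " ++ var ++ ", rdi\n")
      ++ ("mov " ++ pointeur_temp ++ ", rdi\n")
      ++ initialisation_variable_rec ("[" ++ pointeur_temp ++ "]")
           (PySem.Chars.strip (PySem.List.slice t none (some (-1)))) compteur (niveau + 1)
  else ""
termination_by t.length
decreasing_by exact pvStripDropLastLt t h

def initialisation_variable (var : String) (type_var : String) (compteur : Int) (niveau : Int) : String :=
  initialisation_variable_rec var type_var.toList compteur niveau

-- ===== PORT B =====  (B's while-loop, with the accumulator `code`)
def initialisation_variable_loop (code : String) (var : String) (t : List Char) (compteur : Int) (niveau : Int) : String :=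
  if h : PySem.Chars.isIn ['*'] t = true then
    initialisation_variable_loop
      (code ++ ("mov rdi, 8\ncall malloc\nmov " ++ var ++ ", rdi\nmov p" ++ PySem.Int.toStr niveau ++ ", rdi\n"))
      ("[p" ++ PySem.Int.toStr niveau ++ "]")
      (PySem.Chars.strip (PySem.List.slice t none (some (-1)))) compteur (niveau + 1)
  else if t = ['i','n','t'] then
    code ++ ("mov rbx, [argv]\nmov rdi, [rbx+" ++ PySem.Int.toStr (compteur * 8) ++ "]\ncall atoi\nmov [" ++ var ++ "], rdi\n")
  else
    code
termination_by t.length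
decreasing_by exact pvStripDropLastLt t h

def initialisation_variable_alt (var : String) (type_var : String) (compteur : Int) (niveau : Int) : String :=
  initialisation_variable_loop "" var type_var.toList compteur niveau

-- ===== PRECONDITION & SPEC =====
def Spec_initialisation_variable (var : String) (type_var : String) (compteur : Int) (niveau : Int) (out : String) : Prop := out = initialisation_variable_alt var type_var compteur niveau
instance (var : String) (type_var : String) (compteur : Int) (niveau : Int) (out : String) : Decidable (Spec_initialisation_variable var type_var compteur niveau out) := by unfold Spec_initialisation_variable; infer_instance

-- ===== CLAIM (what is proved, stated in full; the proofs are below) =====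
def Claim_equal_initialisation_variable : Prop := ∀ (var : String) (type_var : String) (compteur : Int) (niveau : Int), Dom_initialisation_variable var type_var compteur niveau → Spec_initialisation_variable var type_var compteur niveau (initialisation_variable var type_var compteur niveau)

-- ===== LEMMAS AND PROOFS =====

-- the loop with accumulator `code` computes `code ++` A's recursive result
theorem loop_eq_rec (n : Nat) : ∀ (t : List Char), t.length ≤ n →
    ∀ (code var : String) (compteur niveau : Int),
    initialisation_variable_loop code var t compteur niveau
      = code ++ initialisation_variable_rec var t compteur niveau := by
  induction n with
  | zero =>
    intro t ht code var compteur niveau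
    have ht0 : t = [] := List.length_eq_zero_iff.mp (Nat.le_zero.mp ht)
    subst ht0
    rw [initialisation_variable_loop, initialisation_variable_rec]
    have h1 : PySem.Chars.isIn ['*'] ([]:List Char) = false := by decide
    simp [initialisation_variable_rec, h1]
  | succ n ih =>
    intro t ht code var compteur niveau
    by_cases hstar : PySem.Chars.isIn ['*'] t = true
    · have hint : t ≠ ['i','n','t'] := by
        rintro rfl; exact absurd hstar (by decide)
      rw [initialisation_variable_loop, initialisation_variable_rec]
      rw [dif_pos hstar, if_neg hint, dif_pos hstar]
      have hlt := pvStripDropLastLt t hstar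
      rw [ih _ (by omega)]
      have varg : ("[" ++ ("p" ++ PySem.Int.toStr niveau) ++ "]" : String)
          = "[p" ++ PySem.Int.toStr niveau ++ "]" := by
        apply String.ext; simp
      simp only [varg]
      apply String.ext; simp
    · rw [initialisation_variable_loop, initialisation_variable_rec]
      rw [dif_neg hstar]
      by_cases hint : t = ['i','n','t']
      · rw [if_pos hint, if_pos hint]
      · rw [if_neg hint, if_neg hint, dif_neg hstar, String.append_empty]

-- ===== VERDICT (by name: the statement is the Claim_ definition above) =====
theorem initialisation_variable_spec : Claim_equal_initialisation_variable := by
  intro var type_var compteur niveau _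
  unfold Spec_initialisation_variable initialisation_variable initialisation_variable_alt
  rw [loop_eq_rec type_var.toList.length type_var.toList (le_refl _)]
  simp
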